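-- pv_equiv track=rewrite | github.com/BrandonTang89/Competitive_Programming_4_Solutions | Chapter_1_Introduction/Adhoc_Problems/kattis_shuffling.py | outshuffle
-- ===== SOURCE A (Python) =====
-- def outshuffle(cards):
--     n = len(cards)
--     left = cards[:(n+1)//2]
--     right = cards[(n+1)//2:]
--
--     new_cards = []
--     for i in range(n):
--         if i % 2 == 0:
--             new_cards.append(left.pop(0))
--         else:
--             new_cards.append(right.pop(0))
--     return new_cards
-- ===== SOURCE B (Python) =====
-- def outshuffle(cards):
--     mid = (len(cards) + 1) // 2
--     left = cards[:mid]
--     right = cards[mid:]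
--     out = []
--     for a, b in zip(left, right):
--         out.append(a)
--         out.append(b)
--     if len(left) > len(right):
--         out.append(left[-1])
--     return out
-- ===== Notes on version B (the rewrite author's own statement) =====
-- stated objective: simpler
-- what changed: replaces the parity-indexed loop with pop(0) (quadratic list shifting) by a single zip over the two aligned halves plus one leftover append
import Mathlib
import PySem

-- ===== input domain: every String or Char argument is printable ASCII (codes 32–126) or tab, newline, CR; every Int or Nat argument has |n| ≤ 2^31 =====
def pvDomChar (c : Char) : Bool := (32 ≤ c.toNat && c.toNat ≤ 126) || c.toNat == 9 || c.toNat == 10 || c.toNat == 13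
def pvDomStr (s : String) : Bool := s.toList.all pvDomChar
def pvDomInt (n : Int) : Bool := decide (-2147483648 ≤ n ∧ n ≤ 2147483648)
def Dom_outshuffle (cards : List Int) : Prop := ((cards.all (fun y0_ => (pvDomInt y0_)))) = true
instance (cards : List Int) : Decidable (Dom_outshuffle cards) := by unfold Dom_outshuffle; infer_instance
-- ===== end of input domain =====

-- B replaces A's parity-indexed loop with pop(0) by one zip over the two aligned halves
-- plus a single leftover append (simpler, and avoids quadratic list shifting).

-- ===== PORT A =====
-- the loop 'for i in range(n): if i % 2 == 0: append(left.pop(0)) else: append(right.pop(0))';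
-- the '[]' branches correspond to pop(0) on an empty list (Python would raise; unreachable here,
-- since left/right always hold exactly the elements the remaining iterations consume).
def outshuffleLoopA : List Int → List Int → Nat → Nat → List Int
  | _, _, _, 0 => []
  | left, right, i, fuel + 1 =>
    if i % 2 = 0 then
      match left with
      | x :: ls => x :: outshuffleLoopA ls right (i + 1) fuel
      | [] => []
    else
      match right with
      | x :: rs => x :: outshuffleLoopA left rs (i + 1) fuel
      | [] => []

def outshuffle (cards : List Int) : List Int :=
  let n := cards.length
  -- cards[:(n+1)//2] / cards[(n+1)//2:] with a nonnegative bound = take/drop (exact)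
  let left := cards.take ((n + 1) / 2)
  let right := cards.drop ((n + 1) / 2)
  outshuffleLoopA left right 0 n

-- ===== PORT B =====
-- 'for a, b in zip(left, right): out.append(a); out.append(b)'
def zipPairsB : List Int → List Int → List Int
  | a :: as', b :: bs => a :: b :: zipPairsB as' bs
  | _, _ => []

def outshuffle_alt (cards : List Int) : List Int :=
  let mid := (cards.length + 1) / 2
  let left := cards.take mid
  let right := cards.drop mid
  -- left[-1] on a nonempty left (guaranteed by len(left) > len(right)) = getLastD
  zipPairsB left right ++ (if right.length < left.length then [left.getLastD 0] else [])

-- ===== PRECONDITION & SPEC =====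
def Spec_outshuffle (cards : List Int) (out : List Int) : Prop := out = outshuffle_alt cards
instance (cards : List Int) (out : List Int) : Decidable (Spec_outshuffle cards out) := by unfold Spec_outshuffle; infer_instance

-- ===== CLAIM (what is proved, stated in full; the proofs are below) =====
def Claim_equal_outshuffle : Prop := ∀ (cards : List Int), Dom_outshuffle cards → Spec_outshuffle cards (outshuffle cards)

-- ===== LEMMAS AND PROOFS =====

lemma outshuffleLoopA_eq (right : List Int) :
    ∀ (left : List Int) (i : Nat),
      i % 2 = 0 →
      (left.length = right.length ∨ left.length = right.length + 1) →
      outshuffleLoopA left right i (left.length + right.length) =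
        zipPairsB left right ++
          (if right.length < left.length then [left.getLastD 0] else []) := by
  induction right with
  | nil =>
    intro left i hi hlen
    rcases hlen with h | h
    · have : left = [] := List.length_eq_zero_iff.mp (by simpa using h)
      subst this
      simp [outshuffleLoopA, zipPairsB]
    · obtain ⟨x, hx⟩ : ∃ x, left = [x] := by
        match left, h with
        | [x], _ => exact ⟨x, rfl⟩
      subst hx
      simp [outshuffleLoopA, zipPairsB, hi]
  | cons b bs ih =>
    intro left i hi hlen
    match left, hlen with
    | a :: as', hlen =>
      have hlen' : as'.length = bs.length ∨ as'.length = bs.length + 1 := by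
        simp at hlen; omega
      have hfuel : (a :: as').length + (b :: bs).length = (as'.length + bs.length) + 1 + 1 := by
        simp; omega
      rw [hfuel]
      have hi1 : (i + 1) % 2 ≠ 0 := by omega
      have hi2 : (i + 2) % 2 = 0 := by omega
      simp only [outshuffleLoopA, hi, if_pos, hi1, reduceIte]
      have := ih as' (i + 2) hi2 hlen'
      rw [this]
      rcases hlen' with h | h
      · -- balanced: no leftover on either side
        simp [zipPairsB, h]
      · -- as' one longer than bs: leftover from as', and as' ≠ []
        match as', h with
        | x :: xs, h => simp [zipPairsB, h]

lemma outshuffleLoopA_fuel (left right : List Int) (i fuel : Nat)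
    (hf : fuel = left.length + right.length) (hi : i % 2 = 0)
    (hlen : left.length = right.length ∨ left.length = right.length + 1) :
    outshuffleLoopA left right i fuel =
      zipPairsB left right ++
        (if right.length < left.length then [left.getLastD 0] else []) := by
  subst hf; exact outshuffleLoopA_eq right left i hi hlen

-- ===== VERDICT (by name: the statement is the Claim_ definition above) =====
theorem outshuffle_spec : Claim_equal_outshuffle := by
  intro cards _
  unfold Spec_outshuffle outshuffle outshuffle_alt
  show outshuffleLoopA (cards.take ((cards.length + 1) / 2)) (cards.drop ((cards.length + 1) / 2))
        0 cards.length
      = zipPairsB (cards.take ((cards.length + 1) / 2)) (cards.drop ((cards.length + 1) / 2)) ++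
        (if (cards.drop ((cards.length + 1) / 2)).length <
              (cards.take ((cards.length + 1) / 2)).length then
            [(cards.take ((cards.length + 1) / 2)).getLastD 0]
          else [])
  have hmid : (cards.length + 1) / 2 ≤ cards.length := by omega
  have h1 : (cards.take ((cards.length + 1) / 2)).length = (cards.length + 1) / 2 := by
    simp [hmid]
  have h2 : (cards.drop ((cards.length + 1) / 2)).length =
      cards.length - (cards.length + 1) / 2 := by simp
  exact outshuffleLoopA_fuel _ _ 0 _ (by omega) (by decide) (by omega)
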